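-- pv_equiv track=rewrite | github.com/michaelodusami/py-dsa-mooc | main.py | bitStringOptomized
-- ===== SOURCE A (Python) =====
-- def bitStringOptomized(bitString: str):
--     n = len(bitString)
--     result = 0
--     zeros = 0
--     for i in range(len(bitString)):
--         if bitString[i] == '0':
--             zeros += 1
--         if bitString[i] == '1':
--             result += zeros
--     return result
-- ===== SOURCE B (Python) =====
-- def bitStringOptomized(bitString: str):
--     # collect the positions of all '0' characters once
--     zero_positions = [i for i, c in enumerate(bitString) if c == '0']
--     # for each '1', count how many zero-positions lie strictly below it
--     total = 0
--     for j, c in enumerate(bitString):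
--         if c == '1':
--             total += sum(1 for p in zero_positions if p < j)
--     return total
-- ===== Notes on version B (the rewrite author's own statement) =====
-- stated objective: alternative
-- what changed: B first materialises the list of zero-character positions, then answers for each one-character a counting query (how many zero positions lie below it) over that index list, instead of A's single forward pass with a running zeros counter.
import Mathlib
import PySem

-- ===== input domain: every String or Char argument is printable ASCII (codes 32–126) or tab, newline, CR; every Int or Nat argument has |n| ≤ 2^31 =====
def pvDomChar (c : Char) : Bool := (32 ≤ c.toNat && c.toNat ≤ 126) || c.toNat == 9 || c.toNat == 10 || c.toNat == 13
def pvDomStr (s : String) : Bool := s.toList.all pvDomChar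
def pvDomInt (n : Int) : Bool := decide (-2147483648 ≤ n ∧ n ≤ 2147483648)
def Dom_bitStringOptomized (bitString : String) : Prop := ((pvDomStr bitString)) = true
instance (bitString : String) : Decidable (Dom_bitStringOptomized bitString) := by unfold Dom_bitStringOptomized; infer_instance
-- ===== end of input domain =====

-- B builds the index list of zero positions once and answers a counting query at each '1', instead of A's running-counter scan; alternative decomposition, not faster.

-- ===== PORT A =====
-- forward pass: state (result, zeros); '0' bumps zeros, '1' adds zeros to result
def bitStringOptomized (bitString : String) : Int :=
  (bitString.toList.foldl
    (fun (st : Int × Int) c =>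
      let st1 := if c = '0' then (st.1, st.2 + 1) else st
      if c = '1' then (st1.1 + st1.2, st1.2) else st1)
    (0, 0)).1

-- ===== PORT B =====
-- zero_positions = indices of '0'; at each '1' at index j, add the number of zero positions below j
def bitStringOptomized_alt (bitString : String) : Int :=
  let zpos : List Int :=
    ((PySem.List.enumerate bitString.toList).filter (fun p => p.2 = '0')).map (fun p => p.1)
  (PySem.List.enumerate bitString.toList).foldl
    (fun (acc : Int) p =>
      if p.2 = '1' then acc + ((zpos.filter (fun q => q < p.1)).length : Int) else acc)
    0

-- ===== PRECONDITION & SPEC =====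
def Spec_bitStringOptomized (bitString : String) (out : Int) : Prop := out = bitStringOptomized_alt bitString
instance (bitString : String) (out : Int) : Decidable (Spec_bitStringOptomized bitString out) := by unfold Spec_bitStringOptomized; infer_instance

-- ===== CLAIM (what is proved, stated in full; the proofs are below) =====
def Claim_equal_bitStringOptomized : Prop := ∀ (bitString : String), Dom_bitStringOptomized bitString → Spec_bitStringOptomized bitString (bitStringOptomized bitString)

-- ===== LEMMAS AND PROOFS =====

-- number of '1's in the list, as an Int
def pvOnes : List Char → Int
  | [] => 0
  | c :: t => (if c = '1' then 1 else 0) + pvOnes t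

-- number of '0's in the list, as an Int
def pvZeros : List Char → Int
  | [] => 0
  | c :: t => (if c = '0' then 1 else 0) + pvZeros t

-- number of ('0' at i, '1' at j) pairs with i < j
def pvPairs : List Char → Int
  | [] => 0
  | c :: t => (if c = '0' then pvOnes t else 0) + pvPairs t

-- zero positions of cs when its first index is k
def pvZ (cs : List Char) (k : Int) : List Int :=
  ((PySem.List.enumerate cs k).filter (fun p => p.2 = '0')).map (fun p => p.1)

-- number of elements of zs strictly below j, as an Int
def pvCnt (zs : List Int) (j : Int) : Int := ((zs.filter (fun q => q < j)).length : Int)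

theorem pvA_fold (cs : List Char) (res z : Int) :
    cs.foldl
      (fun (st : Int × Int) c =>
        let st1 := if c = '0' then (st.1, st.2 + 1) else st
        if c = '1' then (st1.1 + st1.2, st1.2) else st1)
      (res, z)
      = (res + pvPairs cs + z * pvOnes cs, z + pvZeros cs) := by
  induction cs generalizing res z with
  | nil => simp [pvPairs, pvOnes, pvZeros]
  | cons c t ih =>
    simp only [List.foldl_cons, pvPairs, pvOnes, pvZeros]
    by_cases h0 : c = '0'
    · simp [h0, ih]; constructor <;> ring
    · by_cases h1 : c = '1'
      · simp [h1, ih]; ring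
      · simp [h0, h1, ih]

theorem pvZ_cons (c : Char) (t : List Char) (k : Int) :
    pvZ (c :: t) k = (if c = '0' then [k] else []) ++ pvZ t (k + 1) := by
  simp only [pvZ, PySem.List.enumerate_cons, List.filter_cons]
  by_cases h0 : c = '0' <;> simp [h0]

theorem pvZ_ge (cs : List Char) (k : Int) : ∀ q ∈ pvZ cs k, k ≤ q := by
  induction cs generalizing k with
  | nil => simp [pvZ]
  | cons c t ih =>
    intro q hq
    rw [pvZ_cons] at hq
    rcases List.mem_append.1 hq with h | h
    · split_ifs at h <;> simp_all
    · have := ih (k + 1) q h; omega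

theorem pvCnt_lt (cs : List Char) (k j : Int) (h : j ≤ k) : pvCnt (pvZ cs k) j = 0 := by
  have : (pvZ cs k).filter (fun q => decide (q < j)) = [] := by
    rw [List.filter_eq_nil_iff]
    intro q hq
    have := pvZ_ge cs k q hq
    simp; omega
  simp [pvCnt, this]

theorem pvCnt_cons (z : Int) (zs : List Int) (j : Int) :
    pvCnt (z :: zs) j = (if z < j then 1 else 0) + pvCnt zs j := by
  simp only [pvCnt, List.filter_cons]
  by_cases h : z < j <;> simp [h] <;> ring

-- generic: the B fold is the sum of the query over the '1' entries
theorem pvFold_sum (l : List (Int × Char)) (f : Int → Int) (a : Int) :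
    l.foldl (fun (acc : Int) p => if p.2 = '1' then acc + f p.1 else acc) a
      = a + ((l.filter (fun p => p.2 = '1')).map (fun p => f p.1)).sum := by
  induction l generalizing a with
  | nil => simp
  | cons p t ih =>
    simp only [List.foldl_cons, List.filter_cons]
    by_cases h : p.2 = '1' <;> simp [h, ih] <;> ring

theorem pvOnes_len (cs : List Char) (k : Int) :
    ((((PySem.List.enumerate cs k).filter (fun p => p.2 = '1')).length : Int)) = pvOnes cs := by
  induction cs generalizing k with
  | nil => simp [pvOnes]
  | cons c t ih =>
    simp only [PySem.List.enumerate_cons, List.filter_cons, pvOnes]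
    by_cases h : c = '1' <;> simp [h, ih] <;> ring

theorem pvMem_enumerate_fst (cs : List Char) (k : Int) :
    ∀ p ∈ PySem.List.enumerate cs k, k ≤ p.1 := by
  intro p hp
  rcases (PySem.List.mem_enumerate_iff cs k p).1 hp with ⟨i, hi, rfl⟩
  simp

-- main lemma: the query sum over the '1' entries equals the pair count
theorem pvMain (cs : List Char) (k : Int) :
    (((PySem.List.enumerate cs k).filter (fun p => p.2 = '1')).map
      (fun p => pvCnt (pvZ cs k) p.1)).sum = pvPairs cs := by
  induction cs generalizing k with
  | nil => simp [pvPairs, pvZ]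
  | cons c t ih =>
    simp only [PySem.List.enumerate_cons, List.filter_cons, pvPairs]
    have hrw : ∀ p ∈ (PySem.List.enumerate t (k + 1)).filter (fun p => p.2 = '1'),
        pvCnt (pvZ (c :: t) k) p.1
          = (if c = '0' then 1 else 0) + pvCnt (pvZ t (k + 1)) p.1 := by
      intro p hp
      have hk : k + 1 ≤ p.1 := pvMem_enumerate_fst t (k + 1) p (List.mem_filter.1 hp).1
      rw [pvZ_cons]
      by_cases h0 : c = '0'
      · simp only [h0, if_pos, List.cons_append, List.nil_append]
        rw [pvCnt_cons]
        have : k < p.1 := by omega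
        simp [this]
      · simp [h0]
    by_cases h1 : c = '1'
    · -- head is a '1': its query is 0 (all zero positions are ≥ k)
      subst h1
      simp only [decide_true, if_true, List.map_cons, List.sum_cons]
      rw [pvCnt_lt ('1' :: t) k k le_rfl]
      rw [List.map_congr_left hrw]
      have h0 : ('1' : Char) ≠ '0' := by decide
      simp [h0, ih (k + 1)]
    · simp only [h1, decide_false, Bool.false_eq_true, if_false]
      rw [List.map_congr_left hrw]
      by_cases h0 : c = '0'
      · simp only [h0, if_pos]
        rw [show (fun p => (1 : Int) + pvCnt (pvZ t (k+1)) p.1)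
              = (fun p => (fun (_ : Int × Char) => (1:Int)) p + (fun p => pvCnt (pvZ t (k+1)) p.1) p) from rfl]
        rw [List.sum_map_add]
        rw [ih (k + 1)]
        simp [← pvOnes_len t (k + 1)]
      · simp [h0, ih (k + 1)]

-- ===== VERDICT (by name: the statement is the Claim_ definition above) =====
theorem bitStringOptomized_spec : Claim_equal_bitStringOptomized := by
  intro s _
  unfold Spec_bitStringOptomized bitStringOptomized bitStringOptomized_alt
  rw [pvA_fold]
  show 0 + pvPairs s.toList + 0 * pvOnes s.toList
      = (PySem.List.enumerate s.toList).foldl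
          (fun (acc : Int) p => if p.2 = '1' then acc + pvCnt (pvZ s.toList 0) p.1 else acc) 0
  rw [pvFold_sum]
  rw [pvMain]
  simp
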